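-- pv_equiv track=rewrite | github.com/krris/tic-tac-toe | models/negamax.py | winning_columns
-- ===== SOURCE A (Python) =====
-- def winning_columns(width, height, marks_to_win):
--     columns = []
--     for x in range(width):
--         for y in range(height - marks_to_win + 1):
--             col = []
--             for i in range(marks_to_win):
--                 col.append( (x, y + i) )
--             columns.append(col)
--     return columns
-- ===== SOURCE B (Python) =====
-- def winning_columns(width, height, marks_to_win):
--     if width <= 0:
--         return []  # no columns at all
--     # Stage 1: the y-windows of a single column, by a sliding window:
--     # grow the window until full, then slide it one step at a time.
--     windows = []
--     win = []
--     for y in range(height):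
--         if len(win) < marks_to_win:
--             win.append(y)
--         else:
--             win = win[1:] + [y]
--         if len(win) == marks_to_win:
--             windows.append(win)
--     # Stage 2: stamp the per-column window table onto every x.
--     return [[(x, y) for y in w] for x in range(width) for w in windows]
-- ===== Notes on version B (the rewrite author's own statement) =====
-- stated objective: alternative
-- what changed: B replaces A's three nested loops (rebuilding every window cell by cell per column) with a two-stage algorithm: after an early return for width <= 0, one sliding-window pass over a single column (grow the window until full, then slide it as win[1:] + [y], emitting each full window), then a flat comprehension stamping that per-column window table onto every x; Pre_ excludes non-positive marks_to_win with height >= marks_to_win, a degenerate corner where A emits empty 'winning lines' (an artefact of empty range(marks_to_win)) while B's sliding window naturally emits nothing.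
-- outside the precondition, e.g. on winning_columns(1, 2, 0): A returns [[], [], []], B returns []; on winning_columns(1, 2, -1): A returns [[], [], [], []], B returns []
import Mathlib
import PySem

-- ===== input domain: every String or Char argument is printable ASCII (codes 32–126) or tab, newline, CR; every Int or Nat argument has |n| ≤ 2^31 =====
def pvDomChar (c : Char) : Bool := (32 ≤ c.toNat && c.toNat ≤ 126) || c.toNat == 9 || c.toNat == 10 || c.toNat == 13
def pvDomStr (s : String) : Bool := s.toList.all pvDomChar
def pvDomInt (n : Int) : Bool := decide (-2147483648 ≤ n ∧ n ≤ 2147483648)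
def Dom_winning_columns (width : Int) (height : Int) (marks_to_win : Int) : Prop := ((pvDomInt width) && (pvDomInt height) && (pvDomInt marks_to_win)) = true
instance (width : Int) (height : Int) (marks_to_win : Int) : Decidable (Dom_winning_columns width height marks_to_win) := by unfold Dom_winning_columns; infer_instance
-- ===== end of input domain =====

-- B computes the per-column y-windows once with a sliding window (grow until full, then slide as
-- win[1:] + [y], emitting each full window) and stamps that table onto every x, replacing A's three
-- nested loops that rebuild each window cell by cell (objective: alternative).

-- ===== PORT A =====
def winning_columns (width : Int) (height : Int) (marks_to_win : Int) : List (List (Int × Int)) :=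
  (PySem.List.pyRange 0 width 1).foldl (fun columns x =>
    (PySem.List.pyRange 0 (height - marks_to_win + 1) 1).foldl (fun columns y =>
      columns ++ [(PySem.List.pyRange 0 marks_to_win 1).foldl (fun col i => col ++ [(x, y + i)]) []])
      columns) []

-- ===== PORT B =====
-- state = (windows, win); the window grows until full, then slides as win[1:] + [y]
def winning_columns_alt (width : Int) (height : Int) (marks_to_win : Int) : List (List (Int × Int)) :=
  if width ≤ 0 then []
  else
    let st := (PySem.List.pyRange 0 height 1).foldl
      (fun (st : List (List Int) × List Int) y =>
        let win := if (st.2.length : Int) < marks_to_win then st.2 ++ [y]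
                   else st.2.drop 1 ++ [y]
        let windows := if (win.length : Int) = marks_to_win then st.1 ++ [win] else st.1
        (windows, win)) ([], [])
    (PySem.List.pyRange 0 width 1).flatMap (fun x =>
      st.1.map (fun w => w.map (fun y => (x, y))))

-- ===== PRECONDITION & SPEC =====
-- Pre_ excludes non-positive marks_to_win with height ≥ marks_to_win, a degenerate corner where A
-- emits empty "winning lines" (an artefact of an empty range(marks_to_win)) while B's sliding
-- window naturally emits nothing — neither value is the specified one.
def Pre_winning_columns (width : Int) (height : Int) (marks_to_win : Int) : Prop :=
  1 ≤ marks_to_win ∨ height < marks_to_win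
instance (width : Int) (height : Int) (marks_to_win : Int) : Decidable (Pre_winning_columns width height marks_to_win) := by unfold Pre_winning_columns; infer_instance
def pvWitness_winning_columns : Int × Int × Int := (2, 4, 3)

def Spec_winning_columns (width : Int) (height : Int) (marks_to_win : Int) (out : List (List (Int × Int))) : Prop := out = winning_columns_alt width height marks_to_win
instance (width : Int) (height : Int) (marks_to_win : Int) (out : List (List (Int × Int))) : Decidable (Spec_winning_columns width height marks_to_win out) := by unfold Spec_winning_columns; infer_instance

-- ===== CLAIM =====
def Claim_equal_winning_columns : Prop := ∀ (width : Int) (height : Int) (marks_to_win : Int), Dom_winning_columns width height marks_to_win → Pre_winning_columns width height marks_to_win → Spec_winning_columns width height marks_to_win (winning_columns width height marks_to_win)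

-- ===== LEMMAS AND PROOFS =====

-- a window starting at s is the shifted 0-based window
theorem pv_pyRange_shift (s m : Int) :
    PySem.List.pyRange s (s + m) 1 = (PySem.List.pyRange 0 m 1).map (fun i => s + i) := by
  simp [PySem.List.pyRange_one, List.map_map, Function.comp]

-- the sliding-window fold invariant (m ≥ 1): after the first n steps the emitted windows are the
-- consecutive ranges of length m starting at 0 … n-m, and win holds the last min(n,m) y's
theorem pv_slide (m : Int) (hm : 1 ≤ m) (n : Nat) :
    (PySem.List.pyRange 0 (n : Int) 1).foldl
      (fun (st : List (List Int) × List Int) y =>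
        let win := if (st.2.length : Int) < m then st.2 ++ [y] else st.2.drop 1 ++ [y]
        let windows := if (win.length : Int) = m then st.1 ++ [win] else st.1
        (windows, win)) ([], []) =
    ((PySem.List.pyRange 0 ((n : Int) - m + 1) 1).map (fun s => PySem.List.pyRange s (s + m) 1),
     PySem.List.pyRange (max 0 ((n : Int) - m)) (n : Int) 1) := by
  induction n with
  | zero =>
    rw [PySem.List.pyRange_one_eq_nil (by omega), PySem.List.pyRange_one_eq_nil (by omega),
        PySem.List.pyRange_one_eq_nil (by omega)]
    simp
  | succ n ih =>
    rw [show ((n + 1 : Nat) : Int) = (n : Int) + 1 by push_cast; ring,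
        PySem.List.pyRange_one_succ_right (by omega), List.foldl_append, ih]
    simp only [List.foldl_cons, List.foldl_nil]
    have hlenold : ((PySem.List.pyRange (max 0 ((n : Int) - m)) (n : Int) 1).length : Int) =
        (n : Int) - max 0 ((n : Int) - m) := by
      rw [PySem.List.length_pyRange_one]; omega
    by_cases hnm : m ≤ (n : Int)
    · -- window already full: slide it
      have hmax : max 0 ((n : Int) - m) = (n : Int) - m := by omega
      have hcond : ¬ ((PySem.List.pyRange (max 0 ((n : Int) - m)) (n : Int) 1).length : Int) < m := by
        rw [hlenold]; omega
      rw [if_neg hcond, hmax,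
          PySem.List.pyRange_one_cons (by omega : (n : Int) - m < (n : Int))]
      simp only [List.drop_succ_cons, List.drop_zero]
      rw [← PySem.List.pyRange_one_succ_right (by omega : (n : Int) - m + 1 ≤ (n : Int))]
      have hlen2 : ((PySem.List.pyRange ((n : Int) - m + 1) ((n : Int) + 1) 1).length : Int) = m := by
        rw [PySem.List.length_pyRange_one]; omega
      rw [if_pos hlen2,
          show max 0 ((n : Int) + 1 - m) = (n : Int) - m + 1 from by omega,
          show (n : Int) + 1 - m + 1 = ((n : Int) - m + 1) + 1 from by ring,
          PySem.List.pyRange_one_succ_right (by omega : (0:Int) ≤ (n:Int) - m + 1),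
          List.map_append, List.map_singleton,
          show (n : Int) - m + 1 + m = (n : Int) + 1 from by ring]
    · -- window still growing: append
      have hmax : max 0 ((n : Int) - m) = 0 := by omega
      have hcond : ((PySem.List.pyRange (max 0 ((n : Int) - m)) (n : Int) 1).length : Int) < m := by
        rw [hlenold]; omega
      rw [if_pos hcond, hmax,
          ← PySem.List.pyRange_one_succ_right (by omega : (0 : Int) ≤ (n : Int))]
      by_cases hfull : (n : Int) + 1 = m
      · have hlen2 : ((PySem.List.pyRange 0 ((n : Int) + 1) 1).length : Int) = m := by
          rw [PySem.List.length_pyRange_one]; omega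
        rw [if_pos hlen2,
            PySem.List.pyRange_one_eq_nil (by omega : (n : Int) - m + 1 ≤ 0),
            show max 0 ((n : Int) + 1 - m) = 0 from by omega,
            show (n : Int) + 1 - m + 1 = (0 : Int) + 1 from by omega,
            PySem.List.pyRange_one_singleton,
            List.map_nil, List.map_singleton,
            show (0 : Int) + m = (n : Int) + 1 from by omega,
            List.nil_append]
      · have hlen2 : ¬ ((PySem.List.pyRange 0 ((n : Int) + 1) 1).length : Int) = m := by
          rw [PySem.List.length_pyRange_one]; omega
        rw [if_neg hlen2,
            PySem.List.pyRange_one_eq_nil (by omega : (n : Int) - m + 1 ≤ 0),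
            PySem.List.pyRange_one_eq_nil (by omega : (n : Int) + 1 - m + 1 ≤ 0),
            show max 0 ((n : Int) + 1 - m) = 0 from by omega]

-- A's inner cell-by-cell fold builds the mapped window
theorem pv_inner_A (x s m : Int) :
    (PySem.List.pyRange 0 m 1).foldl (fun col i => col ++ [(x, s + i)]) [] =
    (PySem.List.pyRange s (s + m) 1).map (fun y => (x, y)) := by
  rw [PySem.List.foldl_append_singleton_eq_map, List.nil_append, pv_pyRange_shift,
      List.map_map]
  rfl

-- ===== VERDICT =====
theorem winning_columns_spec : Claim_equal_winning_columns := by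
  intro width height marks_to_win _ hpre
  unfold Spec_winning_columns winning_columns winning_columns_alt
  by_cases hw : width ≤ 0
  · rw [if_pos hw, PySem.List.pyRange_one_eq_nil hw]
    simp
  rw [if_neg hw]
  by_cases hmain : 1 ≤ marks_to_win ∧ 0 ≤ height
  · obtain ⟨hm, hh⟩ := hmain
    obtain ⟨n, rfl⟩ : ∃ n : Nat, height = (n : Int) :=
      ⟨height.toNat, (Int.toNat_of_nonneg hh).symm⟩
    rw [pv_slide marks_to_win hm n]
    simp only
    have hA : ∀ (acc : List (List (Int × Int))) (x : Int),
        (PySem.List.pyRange 0 ((n : Int) - marks_to_win + 1) 1).foldl (fun columns y =>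
          columns ++ [(PySem.List.pyRange 0 marks_to_win 1).foldl
            (fun col i => col ++ [(x, y + i)]) []]) acc =
        acc ++ ((PySem.List.pyRange 0 ((n : Int) - marks_to_win + 1) 1).map
          (fun s => PySem.List.pyRange s (s + marks_to_win) 1)).map
            (fun w => w.map (fun y => (x, y))) := by
      intro acc x
      rw [PySem.List.foldl_append_singleton_eq_map, List.map_map]
      congr 1
      apply List.map_congr_left
      intro s _
      exact pv_inner_A x s marks_to_win
    calc (PySem.List.pyRange 0 width 1).foldl (fun columns x =>
          (PySem.List.pyRange 0 ((n : Int) - marks_to_win + 1) 1).foldl (fun columns y =>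
            columns ++ [(PySem.List.pyRange 0 marks_to_win 1).foldl
              (fun col i => col ++ [(x, y + i)]) []]) columns) []
        = (PySem.List.pyRange 0 width 1).foldl (fun columns x =>
            columns ++ ((PySem.List.pyRange 0 ((n : Int) - marks_to_win + 1) 1).map
              (fun s => PySem.List.pyRange s (s + marks_to_win) 1)).map
                (fun w => w.map (fun y => (x, y)))) [] := by
          apply PySem.List.foldl_congr_mem
          intro acc x _
          exact hA acc x
      _ = _ := by
          rw [PySem.List.foldl_append_eq_flatMap, List.nil_append]
  · -- degenerate: both sides are empty
    have hempty : height - marks_to_win + 1 ≤ 0 := by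
      rcases hpre with h1 | h2 <;> omega
    have hneg : height ≤ 0 := by
      rcases hpre with h1 | h2 <;> omega
    rw [PySem.List.pyRange_one_eq_nil hempty, PySem.List.pyRange_one_eq_nil hneg]
    simp
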